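-- pv_equiv track=rewrite | github.com/ithras-founders/ithras | products/preparation/backend/app/modules/preparation/services/scoring.py | _check_action_verbs
-- ===== SOURCE A (Python) =====
-- def _check_action_verbs(text: str) -> bool:
--     """Rule: Contains strong action verbs."""
--     action_verbs = [
--         "led", "managed", "built", "created", "developed", "implemented",
--         "improved", "increased", "reduced", "designed", "launched", "achieved",
--         "drove", "established", "executed", "optimized", "scaled",
--     ]
--     text_lower = (text or "").lower()
--     return any(v in text_lower for v in action_verbs)
-- ===== SOURCE B (Python) =====
-- def _check_action_verbs(text: str) -> bool:
--     """Rule: Contains strong action verbs."""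
--     verbs = ("led|managed|built|created|developed|implemented|improved|"
--              "increased|reduced|designed|launched|achieved|drove|established|"
--              "executed|optimized|scaled").split("|")
--     t = (text or "").lower()
--     for i in range(len(t)):
--         if any(t.startswith(v, i) for v in verbs):
--             return True
--     return False
-- ===== Notes on version B (the rewrite author's own statement) =====
-- stated objective: alternative
-- what changed: Replaces 17 independent verb-major substring scans (one full text pass per verb) with a single text-major left-to-right pass that tests all verbs as prefixes at each position (verbs kept as one '|'-joined string split once), short-circuiting at the first hit.
import Mathlib
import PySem

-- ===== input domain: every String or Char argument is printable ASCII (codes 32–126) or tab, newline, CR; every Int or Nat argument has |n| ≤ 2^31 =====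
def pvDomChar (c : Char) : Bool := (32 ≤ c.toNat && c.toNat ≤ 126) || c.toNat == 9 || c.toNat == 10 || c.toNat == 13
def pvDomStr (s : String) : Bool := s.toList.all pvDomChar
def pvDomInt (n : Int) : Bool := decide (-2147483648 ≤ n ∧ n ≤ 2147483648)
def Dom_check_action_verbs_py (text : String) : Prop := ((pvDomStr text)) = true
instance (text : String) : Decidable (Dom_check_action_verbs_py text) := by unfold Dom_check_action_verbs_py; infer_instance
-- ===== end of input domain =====

-- B replaces A's 17 verb-major substring scans with one text-major left-to-right pass testing
-- all verbs (split once from a '|'-joined string) as prefixes at each position (objective: alternative).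

-- ===== PORT A =====
def pvVerbsA : List (List Char) :=
  ["led".toList, "managed".toList, "built".toList, "created".toList, "developed".toList,
   "implemented".toList, "improved".toList, "increased".toList, "reduced".toList,
   "designed".toList, "launched".toList, "achieved".toList, "drove".toList,
   "established".toList, "executed".toList, "optimized".toList, "scaled".toList]

def check_action_verbs_py (text : String) : Bool :=
  -- text_lower = (text or "").lower(): an empty string is falsy, so the guard yields ""
  let tl := PySem.Chars.lower (if text.toList.isEmpty then [] else text.toList)
  pvVerbsA.any (fun v => PySem.Chars.isIn v tl)

-- ===== PORT B =====
-- verbs = "led|managed|…|scaled".split("|")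
def pvVerbsB : List (List Char) :=
  PySem.Chars.splitOn
    "led|managed|built|created|developed|implemented|improved|increased|reduced|designed|launched|achieved|drove|established|executed|optimized|scaled".toList
    ['|']

-- 'for i in range(len(t)): if any(t.startswith(v, i) for v in verbs): return True' —
-- recursion on the suffixes of t, testing every verb as a prefix at each position
def pvScan : List Char → Bool
  | [] => false
  | c :: t => pvVerbsB.any (fun v => PySem.Chars.startswith (c :: t) v) || pvScan t

def check_action_verbs_py_alt (text : String) : Bool :=
  pvScan (PySem.Chars.lower (match text.toList with | [] => [] | l => l))

-- ===== PRECONDITION & SPEC =====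
def Spec_check_action_verbs_py (text : String) (out : Bool) : Prop := out = check_action_verbs_py_alt text
instance (text : String) (out : Bool) : Decidable (Spec_check_action_verbs_py text out) := by unfold Spec_check_action_verbs_py; infer_instance

-- ===== CLAIM (what is proved, stated in full; the proofs are below) =====
def Claim_equal_check_action_verbs_py : Prop := ∀ (text : String), Dom_check_action_verbs_py text → Spec_check_action_verbs_py text (check_action_verbs_py text)

-- ===== LEMMAS AND PROOFS =====

set_option maxRecDepth 8192 in
theorem pvVerbsB_eq : pvVerbsB = pvVerbsA := by decide

-- the text-major scan finds exactly the verbs that are infixes of the text (all verbs nonempty)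
theorem pvScan_eq_any :
    ∀ cs : List Char, pvScan cs = pvVerbsA.any (fun v => PySem.Chars.isIn v cs) := by
  have h : ∀ v ∈ pvVerbsA, v ≠ [] := by decide
  intro cs
  induction cs with
  | nil =>
    simp only [pvScan]
    symm
    simp only [List.any_eq_false, PySem.Chars.isIn_iff_infix]
    intro v hv
    simp only [List.infix_nil]
    exact h v hv
  | cons c t ih =>
    simp only [pvScan, pvVerbsB_eq, ih]
    rw [Bool.eq_iff_iff, Bool.or_eq_true, List.any_eq_true, List.any_eq_true, List.any_eq_true]
    constructor
    · rintro (⟨v, hv, hp⟩ | ⟨v, hv, hi⟩)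
      · refine ⟨v, hv, ?_⟩
        rw [PySem.Chars.isIn_iff_infix]
        exact (List.isPrefixOf_iff_prefix.mp hp).isInfix
      · refine ⟨v, hv, ?_⟩
        rw [PySem.Chars.isIn_iff_infix] at hi ⊢
        exact hi.trans (List.suffix_cons c t).isInfix
    · rintro ⟨v, hv, hi⟩
      rw [PySem.Chars.isIn_iff_infix, List.infix_cons_iff] at hi
      rcases hi with hpre | hinf
      · exact Or.inl ⟨v, hv, List.isPrefixOf_iff_prefix.mpr hpre⟩
      · exact Or.inr ⟨v, hv, (PySem.Chars.isIn_iff_infix v t).mpr hinf⟩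

-- ===== VERDICT (by name: the statement is the Claim_ definition above) =====
theorem check_action_verbs_py_spec : Claim_equal_check_action_verbs_py := by
  intro text _
  unfold Spec_check_action_verbs_py check_action_verbs_py check_action_verbs_py_alt
  rw [pvScan_eq_any]
  cases text.toList <;> rfl
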